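-- pv_equiv track=rewrite | github.com/Ssunbell/Algorithm_Study | 25주차/BOJ_2573/BOJ_1744_이승환.py | solution
-- ===== SOURCE A (Python) =====
-- def solution(n,nums):
--     nums = sorted(nums, key=abs, reverse= True)
--     answer = 0
--     neg = []
--     pos = []
--     for num in nums:
--         if num < 1:
--             neg.append(num)
--             if len(neg) == 2:
--                 answer += (neg[0] * neg[1])
--                 neg = []
--         elif num > 1:
--             pos.append(num)
--             if len(pos) == 2:
--                 answer += (pos[0] * pos[1])
--                 pos = []
--         elif num == 1:
--             answer += num
--     answer += (sum(pos) + sum(neg))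
--     return answer
-- ===== SOURCE B (Python) =====
-- def solution(n, nums):
--     s = sorted(nums)
--     total = 0
--     i, j = 0, len(s)
--     # pair the <1 prefix forward (most negative first)
--     while i + 1 < len(s) and s[i + 1] < 1:
--         total += s[i] * s[i + 1]
--         i += 2
--     if i < len(s) and s[i] < 1:
--         total += s[i]
--         i += 1
--     # pair the >1 suffix backward (largest first)
--     while j - 2 >= i and s[j - 2] > 1:
--         total += s[j - 1] * s[j - 2]
--         j -= 2
--     if j - 1 >= i and s[j - 1] > 1:
--         total += s[j - 1]
--         j -= 1
--     # everything left between the pointers is the 1s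
--     return total + (j - i)
-- ===== Notes on version B (the rewrite author's own statement) =====
-- stated objective: alternative
-- what changed: A does one abs-keyed reverse sort and scans it with two stateful 2-element flush buffers; B sorts plainly ascending (no key, no reverse) and runs a two-pointer scan: it pairs the <1 prefix forward, pairs the >1 suffix backward, and counts the 1s as the gap left between the pointers.
import Mathlib
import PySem

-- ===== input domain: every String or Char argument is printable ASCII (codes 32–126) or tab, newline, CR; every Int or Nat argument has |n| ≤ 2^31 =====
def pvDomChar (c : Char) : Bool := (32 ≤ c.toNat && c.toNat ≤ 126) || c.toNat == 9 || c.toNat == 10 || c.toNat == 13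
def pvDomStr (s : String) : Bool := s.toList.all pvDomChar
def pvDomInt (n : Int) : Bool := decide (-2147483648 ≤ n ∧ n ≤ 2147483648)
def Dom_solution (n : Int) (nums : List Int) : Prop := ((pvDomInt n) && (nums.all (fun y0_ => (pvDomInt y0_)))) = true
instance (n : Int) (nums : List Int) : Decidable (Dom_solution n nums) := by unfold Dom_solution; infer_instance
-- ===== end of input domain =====

-- B: instead of A's abs-keyed reverse sort scanned with stateful 2-element flush buffers, B sorts
-- plainly ascending and runs a two-pointer scan (prefix of <1 paired forward, suffix of >1 paired
-- backward, the 1s counted as the gap between the pointers); objective: alternative.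


-- ===== PORT A =====
-- one step of A's for-loop; state = (answer, neg buffer, pos buffer)
def stepA (st : Int × List Int × List Int) (num : Int) : Int × List Int × List Int :=
  let answer := st.1
  let neg := st.2.1
  let pos := st.2.2
  if num < 1 then
    let neg := neg ++ [num]
    if neg.length == 2 then (answer + neg.getD 0 0 * neg.getD 1 0, [], pos)
    else (answer, neg, pos)
  else if num > 1 then
    let pos := pos ++ [num]
    if pos.length == 2 then (answer + pos.getD 0 0 * pos.getD 1 0, neg, [])
    else (answer, neg, pos)
  else if num == 1 then (answer + num, neg, pos)
  else (answer, neg, pos)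

def solution (n : Int) (nums : List Int) : Int :=
  let nums := PySem.List.sorted nums (fun x => |x|) true
  let st := nums.foldl stepA (0, [], [])
  st.1 + (st.2.2.sum + st.2.1.sum)

-- ===== PORT B =====
-- first while loop of Source B: pair the <1 prefix forward; all indices Source B reads are nonnegative and
-- in range, so List.getD with a Nat index is exact for Python's s[i]
def lowLoop (s : List Int) (i : Nat) (total : Int) : Nat × Int :=
  if h : i + 1 < s.length ∧ s.getD (i + 1) 0 < 1 then
    lowLoop s (i + 2) (total + s.getD i 0 * s.getD (i + 1) 0)
  else (i, total)
termination_by s.length - i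
decreasing_by omega

-- second while loop of Source B: pair the >1 suffix backward
def highLoop (s : List Int) (i j : Nat) (total : Int) : Nat × Int :=
  if h : i + 2 ≤ j ∧ s.getD (j - 2) 0 > 1 then
    highLoop s i (j - 2) (total + s.getD (j - 1) 0 * s.getD (j - 2) 0)
  else (j, total)
termination_by j
decreasing_by omega

def solution_alt (n : Int) (nums : List Int) : Int :=
  let s := PySem.List.sorted nums (fun x => x) false
  let p1 := lowLoop s 0 0
  let p2 := if p1.1 < s.length ∧ s.getD p1.1 0 < 1 then (p1.1 + 1, p1.2 + s.getD p1.1 0) else p1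
  let p3 := highLoop s p2.1 s.length p2.2
  let p4 := if p2.1 + 1 ≤ p3.1 ∧ s.getD (p3.1 - 1) 0 > 1 then (p3.1 - 1, p3.2 + s.getD (p3.1 - 1) 0) else p3
  p4.2 + ((p4.1 - p2.1 : Nat) : Int)

-- ===== PRECONDITION & SPEC =====
def Spec_solution (n : Int) (nums : List Int) (out : Int) : Prop := out = solution_alt n nums
instance (n : Int) (nums : List Int) (out : Int) : Decidable (Spec_solution n nums out) := by unfold Spec_solution; infer_instance

-- ===== CLAIM (what is proved, stated in full; the proofs are below) =====
def Claim_equal_solution : Prop := ∀ (n : Int) (nums : List Int), Dom_solution n nums → Spec_solution n nums (solution n nums)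

-- ===== LEMMAS AND PROOFS =====

-- adjacent-pair sum of a list: products of consecutive pairs, the odd leftover added raw
def pairRec : List Int → Int
  | a :: b :: t => a * b + pairRec t
  | g => g.sum

-- buffers in A's loop are always empty or a singleton
def Buf (l : List Int) : Prop := l = [] ∨ ∃ x, l = [x]

-- A's loop, started on buffers nb/pb and counting in the final buffer sums, computes
-- the count of ones plus the adjacent-pair sums of the two filtered subsequences.
theorem loopA_decomp (l : List Int) : ∀ (a : Int) (nb pb : List Int), Buf nb → Buf pb →
    (let st := l.foldl stepA (a, nb, pb); st.1 + (st.2.2.sum + st.2.1.sum))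
      = a + pairRec (nb ++ l.filter (fun x => decide (x < 1)))
          + pairRec (pb ++ l.filter (fun x => decide (x > 1)))
          + l.countP (fun x => decide (x = 1)) := by
  induction l with
  | nil =>
    rintro a nb pb (rfl | ⟨x, rfl⟩) (rfl | ⟨y, rfl⟩) <;> (simp [pairRec]; try ring)
  | cons x t ih =>
    rintro a nb pb hnb hpb
    by_cases h1 : x < 1
    · have h2 : ¬ (1 < x) := by omega
      have h3 : ¬ (x = 1) := by omega
      rcases hnb with rfl | ⟨y, rfl⟩
      · have H := ih a [x] pb (Or.inr ⟨x, rfl⟩) hpb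
        simp [stepA, h1, h2, h3] at H ⊢
        linarith [H]
      · have H := ih (a + y * x) [] pb (Or.inl rfl) hpb
        simp [stepA, h1, h2, h3, pairRec] at H ⊢
        linarith [H]
    · by_cases h2 : x > 1
      · have h3 : ¬ (x = 1) := by omega
        rcases hpb with rfl | ⟨y, rfl⟩
        · have H := ih a nb [x] hnb (Or.inr ⟨x, rfl⟩)
          simp [stepA, h1, h2, h3] at H ⊢
          linarith [H]
        · have H := ih (a + y * x) nb [] hnb (Or.inl rfl)
          simp [stepA, h1, h2, h3, pairRec] at H ⊢
          linarith [H]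
      · have hx1 : x = 1 := by omega
        subst hx1
        have H := ih (a + 1) nb pb hnb hpb
        simp [stepA] at H ⊢
        linarith [H]

-- filtering the abs-desc-sorted list to the <1 group gives the value-ascending sort of the group
theorem neg_filter_sorted (nums : List Int) :
    (PySem.List.sorted nums (fun x => |x|) true).filter (fun x => decide (x < 1))
      = PySem.List.sorted (nums.filter (fun x => decide (x < 1))) (fun x => x) false := by
  refine List.Perm.eq_of_pairwise (le := fun a b : Int => a ≤ b)
    (fun a b _ _ h1 h2 => by omega) ?_ (PySem.List.sorted_pairwise _ _)
    (((PySem.List.sorted_perm nums (fun x => |x|) true).filter _).trans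
      (PySem.List.sorted_perm _ (fun x => x) false).symm)
  refine List.Pairwise.imp_of_mem ?_ ((PySem.List.sorted_pairwise_rev nums (fun x => |x|)).filter _)
  intro a b ha hb hab
  have ha' : a < 1 := by simpa using (List.of_mem_filter ha)
  have hb' : b < 1 := by simpa using (List.of_mem_filter hb)
  rw [abs_of_nonpos (by omega), abs_of_nonpos (by omega)] at hab
  omega

-- filtering the abs-desc-sorted list to the >1 group gives the value-descending sort of the group
theorem pos_filter_sorted (nums : List Int) :
    (PySem.List.sorted nums (fun x => |x|) true).filter (fun x => decide (x > 1))
      = PySem.List.sorted (nums.filter (fun x => decide (x > 1))) (fun x => x) true := by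
  refine List.Perm.eq_of_pairwise (le := fun a b : Int => b ≤ a)
    (fun a b _ _ h1 h2 => by omega) ?_ (PySem.List.sorted_pairwise_rev _ _)
    (((PySem.List.sorted_perm nums (fun x => |x|) true).filter _).trans
      (PySem.List.sorted_perm _ (fun x => x) true).symm)
  refine List.Pairwise.imp_of_mem ?_ ((PySem.List.sorted_pairwise_rev nums (fun x => |x|)).filter _)
  intro a b ha hb hab
  have ha' : a > 1 := by simpa using (List.of_mem_filter ha)
  have hb' : b > 1 := by simpa using (List.of_mem_filter hb)
  rw [abs_of_nonneg (by omega), abs_of_nonneg (by omega)] at hab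
  omega

-- a value-descending sort is the reverse of the value-ascending one (ties are equal values)
theorem desc_eq_reverse_asc (l : List Int) :
    PySem.List.sorted l (fun x => x) true = (PySem.List.sorted l (fun x => x) false).reverse := by
  refine List.Perm.eq_of_pairwise (le := fun a b : Int => b ≤ a)
    (fun a b _ _ h1 h2 => by omega) (PySem.List.sorted_pairwise_rev _ _) ?_
    ((PySem.List.sorted_perm l (fun x => x) true).trans
      (((List.reverse_perm _).trans (PySem.List.sorted_perm l (fun x => x) false)).symm))
  rw [List.pairwise_reverse]
  exact PySem.List.sorted_pairwise _ _

-- decomposition of the plain ascending sort: the <1 prefix, then the 1s, then the >1 suffix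
theorem asc_decomp (nums : List Int) :
    PySem.List.sorted nums (fun x => x) false
      = PySem.List.sorted (nums.filter (fun x => decide (x < 1))) (fun x => x) false
        ++ (List.replicate (nums.countP (fun x => decide (x = 1))) 1
        ++ PySem.List.sorted (nums.filter (fun x => decide (x > 1))) (fun x => x) false) := by
  have hones : nums.filter (fun x => decide (x = 1))
      = List.replicate (nums.countP (fun x => decide (x = 1))) 1 := by
    rw [List.eq_replicate_iff]
    refine ⟨by simp [List.countP_eq_length_filter], ?_⟩
    intro b hb
    simpa using List.of_mem_filter hb
  have hperm : nums.Perm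
      (nums.filter (fun x => decide (x < 1)) ++ (nums.filter (fun x => decide (x = 1))
        ++ nums.filter (fun x => decide (x > 1)))) := by
    have h1 := (List.filter_append_perm (fun x => decide (x < 1)) nums)
    have h2 := (List.filter_append_perm (fun x => decide (x = 1))
      (nums.filter (fun x => !decide (x < 1))))
    rw [List.filter_filter, List.filter_filter] at h2
    have e1 : nums.filter (fun x => decide (x = 1) && !decide (x < 1))
        = nums.filter (fun x => decide (x = 1)) := by
      apply List.filter_congr; intro x _
      by_cases hx : x = 1 <;> simp [hx]
    have e2 : nums.filter (fun x => !decide (x = 1) && !decide (x < 1))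
        = nums.filter (fun x => decide (x > 1)) := by
      apply List.filter_congr; intro x _
      by_cases hx : x > 1
      · simp [hx]; omega
      · simp [hx]; omega
    rw [e1, e2] at h2
    exact (h1.symm.trans ((h2.symm).append_left _)).symm.symm
  refine List.Perm.eq_of_pairwise (le := fun a b : Int => a ≤ b)
    (fun a b _ _ h1 h2 => by omega) (PySem.List.sorted_pairwise _ _) ?_ ?_
  · rw [List.pairwise_append, List.pairwise_append]
    refine ⟨PySem.List.sorted_pairwise _ _,
      ⟨?_, PySem.List.sorted_pairwise _ _, ?_⟩, ?_⟩
    · refine List.pairwise_iff_getElem.2 ?_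
      intro p q hp hq hpq
      simp
    · intro a ha b hb
      have ha1 : a = 1 := List.eq_of_mem_replicate ha
      have hb1 : b > 1 := by
        simpa using List.of_mem_filter ((PySem.List.sorted_perm _ _ _).mem_iff.1 hb)
      omega
    · intro a ha b hb
      have ha1 : a < 1 := by
        simpa using List.of_mem_filter ((PySem.List.sorted_perm _ _ _).mem_iff.1 ha)
      rcases List.mem_append.1 hb with hb | hb
      · have : b = 1 := List.eq_of_mem_replicate hb
        omega
      · have : b > 1 := by
          simpa using List.of_mem_filter ((PySem.List.sorted_perm _ _ _).mem_iff.1 hb)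
        omega
  · refine (PySem.List.sorted_perm _ _ _).trans (hperm.trans ?_)
    rw [hones]
    exact (PySem.List.sorted_perm _ _ _).symm.append
      ((List.Perm.refl _).append (PySem.List.sorted_perm _ _ _).symm)

-- reading s through a known drop: s[i+k] is the k-th element of the dropped tail
theorem getD_of_drop (s seg : List Int) (i k : Nat) (h : s.drop i = seg) (hk : k < seg.length) :
    s.getD (i + k) 0 = seg.getD k 0 := by
  subst h
  have hik : i + k < s.length := by simp at hk; omega
  rw [List.getD_eq_getElem _ _ hik, List.getD_eq_getElem _ _ hk]
  simp [List.getElem_drop]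

-- the same through a take: for k inside the segment, s[i+k] is the k-th element of s[i:j]
theorem getD_of_take_drop (s seg : List Int) (i j k : Nat) (hj : j ≤ s.length)
    (h : (s.take j).drop i = seg) (hk : k < seg.length) :
    s.getD (i + k) 0 = seg.getD k 0 := by
  have h1 : (s.take j).getD (i + k) 0 = seg.getD k 0 := getD_of_drop _ _ i k h hk
  have hlen : seg.length = j - i := by rw [← h]; simp; omega
  have hik : i + k < j := by omega
  rw [← h1, List.getD_eq_getElem _ _ (by omega), List.getD_eq_getElem _ _ (by simp; omega)]
  simp

-- the low phase (first while loop plus its trailing if) consumes exactly the <1 prefix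
theorem lowPhase_spec (low : List Int) : ∀ (s rest : List Int) (i : Nat) (total : Int),
    s.drop i = low ++ rest → (∀ x ∈ low, x < 1) → (∀ x ∈ rest, 1 ≤ x) →
    (if (lowLoop s i total).1 < s.length ∧ s.getD (lowLoop s i total).1 0 < 1
      then ((lowLoop s i total).1 + 1, (lowLoop s i total).2 + s.getD (lowLoop s i total).1 0)
      else lowLoop s i total)
      = (i + low.length, total + pairRec low) := by
  induction low using pairRec.induct with
  | case1 a b t ih =>
    intro s rest i total hdrop hlow hrest
    have hlen : (a :: b :: (t ++ rest)).length = s.length - i := by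
      rw [show a :: b :: (t ++ rest) = (a :: b :: t) ++ rest by simp, ← hdrop]; simp
    have h1 := getD_of_drop s (a :: b :: (t ++ rest)) i 1 (by simpa using hdrop) (by simp)
    have h0 := getD_of_drop s (a :: b :: (t ++ rest)) i 0 (by simpa using hdrop) (by simp)
    simp only [Nat.add_zero, List.getD_cons_succ, List.getD_cons_zero] at h0 h1
    rw [lowLoop, dif_pos ⟨by simp at hlen; omega, by rw [h1]; exact hlow b (by simp)⟩, h0, h1]
    have hdrop2 : s.drop (i + 2) = t ++ rest := by
      have hd : s.drop (i + 2) = (s.drop i).drop 2 := by rw [List.drop_drop]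
      rw [hd, hdrop]; simp
    have H := ih s rest (i + 2) (total + a * b) hdrop2
      (fun x hx => hlow x (by simp [hx])) hrest
    rw [H]
    refine Prod.ext ?_ ?_
    · simp; omega
    · simp [pairRec]; ring
  | case2 g hg =>
    intro s rest i total hdrop hlow hrest
    have hstop : lowLoop s i total = (i, total) := by
      rw [lowLoop, dif_neg]
      rintro ⟨hi1, hval⟩
      rcases g with _ | ⟨a, t⟩
      · simp only [List.nil_append] at hdrop
        have hlen : rest.length = s.length - i := by rw [← hdrop]; simp
        have h1 := getD_of_drop s rest i 1 hdrop (by omega)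
        rw [h1] at hval
        have hmem : rest.getD 1 0 ∈ rest := by
          rw [List.getD_eq_getElem _ _ (by omega)]; exact List.getElem_mem _
        have := hrest _ hmem
        omega
      · rcases t with _ | ⟨b, t'⟩
        · have hdrop' : s.drop i = a :: rest := by simpa using hdrop
          have hlen : (a :: rest).length = s.length - i := by rw [← hdrop']; simp
          have h1 := getD_of_drop s (a :: rest) i 1 hdrop' (by simp at hlen ⊢; omega)
          simp only [List.getD_cons_succ] at h1
          rw [h1] at hval
          have hmem : rest.getD 0 0 ∈ rest := by
            rw [List.getD_eq_getElem _ _ (by simp at hlen; omega)]; exact List.getElem_mem _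
          have := hrest _ hmem
          omega
        · exact absurd rfl (hg a b t')
    rw [hstop]
    rcases g with _ | ⟨a, t⟩
    · simp only [List.nil_append] at hdrop
      rw [if_neg]
      · refine Prod.ext (by simp) (by simp [pairRec])
      rintro ⟨hi, hval⟩
      have hlen : rest.length = s.length - i := by rw [← hdrop]; simp
      have h1 := getD_of_drop s rest i 0 hdrop (by omega)
      simp only [Nat.add_zero] at h1
      rw [h1] at hval
      have hmem : rest.getD 0 0 ∈ rest := by
        rw [List.getD_eq_getElem _ _ (by omega)]; exact List.getElem_mem _
      have := hrest _ hmem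
      omega
    · rcases t with _ | ⟨b, t'⟩
      · have hdrop' : s.drop i = a :: rest := by simpa using hdrop
        have hlen : (a :: rest).length = s.length - i := by rw [← hdrop']; simp
        have h0 := getD_of_drop s (a :: rest) i 0 hdrop' (by simp)
        simp only [Nat.add_zero, List.getD_cons_zero] at h0
        rw [if_pos ⟨by simp at hlen; omega, by rw [h0]; exact hlow a (by simp)⟩, h0]
        refine Prod.ext (by simp) (by simp [pairRec])
      · exact absurd rfl (hg a b t')

-- the high phase (second while loop plus its trailing if) consumes exactly the >1 suffix,
-- pairing from the top; hr is that suffix listed largest-first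
theorem highPhase_spec (hr : List Int) : ∀ (s mid : List Int) (i j : Nat) (total : Int),
    j ≤ s.length → i ≤ j → (s.take j).drop i = mid ++ hr.reverse →
    (∀ x ∈ mid, x = 1) → (∀ x ∈ hr, 1 < x) →
    (if i + 1 ≤ (highLoop s i j total).1 ∧ s.getD ((highLoop s i j total).1 - 1) 0 > 1
      then ((highLoop s i j total).1 - 1, (highLoop s i j total).2 + s.getD ((highLoop s i j total).1 - 1) 0)
      else highLoop s i j total)
      = (i + mid.length, total + pairRec hr) := by
  induction hr using pairRec.induct with
  | case1 a b t ih =>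
    intro s mid i j total hj hij hdrop hmid hhr
    have hlen : (mid ++ (a :: b :: t).reverse).length = j - i := by rw [← hdrop]; simp; omega
    have hlen' : mid.length + (t.length + 2) = j - i := by simp at hlen; omega
    have hja : s.getD (j - 1) 0 = a := by
      have h1 := getD_of_take_drop s (mid ++ (a :: b :: t).reverse) i j
        ((mid ++ (t.reverse ++ [b])).length) hj hdrop (by simp)
      rw [show i + (mid ++ (t.reverse ++ [b])).length = j - 1 by simp; omega] at h1
      rw [h1, show mid ++ (a :: b :: t).reverse = (mid ++ (t.reverse ++ [b])) ++ [a] by simp,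
        List.getD_append_right _ _ _ _ (le_refl _)]
      simp
    have hjb : s.getD (j - 2) 0 = b := by
      have h1 := getD_of_take_drop s (mid ++ (a :: b :: t).reverse) i j
        ((mid ++ t.reverse).length) hj hdrop (by simp)
      rw [show i + (mid ++ t.reverse).length = j - 2 by simp; omega] at h1
      rw [h1, show mid ++ (a :: b :: t).reverse = (mid ++ t.reverse) ++ ([b] ++ [a]) by simp,
        List.getD_append_right _ _ _ _ (le_refl _)]
      simp
    rw [highLoop, dif_pos ⟨by omega, by rw [hjb]; exact hhr b (by simp)⟩, hja, hjb]
    have hdrop2 : (s.take (j - 2)).drop i = mid ++ t.reverse := by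
      have ht : s.take (j - 2) = (s.take j).take (j - 2) := by
        rw [List.take_take]; congr 1; omega
      rw [ht, List.drop_take, hdrop,
        show mid ++ (a :: b :: t).reverse = (mid ++ t.reverse) ++ [b, a] by simp,
        List.take_append_of_le_length (by simp; omega),
        List.take_of_length_le (by simp; omega)]
    have H := ih s mid i (j - 2) (total + a * b) (by omega) (by omega) hdrop2 hmid
      (fun x hx => hhr x (by simp [hx]))
    rw [H]
    refine Prod.ext rfl ?_
    simp [pairRec]; ring
  | case2 g hg =>
    intro s mid i j total hj hij hdrop hmid hhr
    have hlen : (mid ++ g.reverse).length = j - i := by rw [← hdrop]; simp; omega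
    have hglen : g.length ≤ 1 := by
      rcases g with _ | ⟨a, t⟩
      · simp
      rcases t with _ | ⟨b, t'⟩
      · simp
      · exact absurd rfl (hg a b t')
    have hmidD : ∀ k, k < mid.length → s.getD (i + k) 0 = 1 := by
      intro k hk
      have h1 := getD_of_take_drop s (mid ++ g.reverse) i j k hj hdrop (by simp; omega)
      rw [h1, List.getD_append _ _ _ _ hk]
      have hmem : mid.getD k 0 ∈ mid := by
        rw [List.getD_eq_getElem _ _ hk]; exact List.getElem_mem _
      exact hmid _ hmem
    have hstop : highLoop s i j total = (j, total) := by
      rw [highLoop, dif_neg]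
      rintro ⟨hij2, hval⟩
      have hklt : j - 2 - i < mid.length := by simp at hlen; omega
      have h1 := hmidD (j - 2 - i) hklt
      rw [show i + (j - 2 - i) = j - 2 by omega] at h1
      omega
    rw [hstop]
    change (if i + 1 ≤ j ∧ s.getD (j - 1) 0 > 1
      then (j - 1, total + s.getD (j - 1) 0) else (j, total)) = _
    rcases g with _ | ⟨a, t⟩
    · rw [if_neg]
      · simp at hlen
        refine Prod.ext (by simp; omega) (by simp [pairRec])
      rintro ⟨hij1, hval⟩
      have hklt : j - 1 - i < mid.length := by simp at hlen; omega
      have h1 := hmidD (j - 1 - i) hklt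
      rw [show i + (j - 1 - i) = j - 1 by omega] at h1
      omega
    · rcases t with _ | ⟨b, t'⟩
      · rw [List.reverse_singleton] at hdrop hlen
        have h1 := getD_of_take_drop s (mid ++ [a]) i j mid.length hj hdrop (by simp)
        rw [show i + mid.length = j - 1 by simp at hlen; omega] at h1
        rw [List.getD_append_right _ _ _ _ (le_refl _)] at h1
        simp only [Nat.sub_self, List.getD_cons_zero] at h1
        rw [if_pos ⟨by simp at hlen; omega, by rw [h1]; exact hhr a (by simp)⟩, h1]
        refine Prod.ext (by simp at hlen ⊢; omega) (by simp [pairRec])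
      · exact absurd rfl (hg a b t')

-- ===== VERDICT (by name: the statement is the Claim_ definition above) =====
theorem solution_spec : Claim_equal_solution := by
  intro n nums _
  show solution n nums = solution_alt n nums
  set low := PySem.List.sorted (nums.filter (fun x => decide (x < 1))) (fun x => x) false with hlowdef
  set high := PySem.List.sorted (nums.filter (fun x => decide (x > 1))) (fun x => x) false with hhighdef
  set k := nums.countP (fun x => decide (x = 1)) with hkdef
  have hA : solution n nums = pairRec low + pairRec high.reverse + k := by
    unfold solution
    have h := loopA_decomp (PySem.List.sorted nums (fun x => |x|) true) 0 [] []
      (Or.inl rfl) (Or.inl rfl)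
    simp only [List.nil_append] at h
    simp only [h, neg_filter_sorted, pos_filter_sorted, desc_eq_reverse_asc,
      (PySem.List.sorted_perm nums (fun x => |x|) true).countP_eq]
    ring
  have hs := asc_decomp nums
  rw [← hlowdef, ← hhighdef, ← hkdef] at hs
  set s := PySem.List.sorted nums (fun x => x) false with hsdef
  have hlow1 : ∀ x ∈ low, x < 1 := fun x hx => by
    simpa using List.of_mem_filter ((PySem.List.sorted_perm _ _ _).mem_iff.1 hx)
  have hrest1 : ∀ x ∈ (List.replicate k 1 ++ high), 1 ≤ x := by
    intro x hx
    rcases List.mem_append.1 hx with hx | hx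
    · simp [List.eq_of_mem_replicate hx]
    · have : x > 1 := by
        simpa using List.of_mem_filter ((PySem.List.sorted_perm _ _ _).mem_iff.1 hx)
      omega
  have hhr1 : ∀ x ∈ high.reverse, 1 < x := by
    intro x hx
    rw [List.mem_reverse] at hx
    simpa using List.of_mem_filter ((PySem.List.sorted_perm _ _ _).mem_iff.1 hx)
  have hLow := lowPhase_spec low s (List.replicate k 1 ++ high) 0 0
    (by rw [List.drop_zero, hs]) hlow1 hrest1
  have hmid1 : ∀ x ∈ List.replicate k (1 : Int), x = 1 := fun x hx => List.eq_of_mem_replicate hx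
  have hHigh := highPhase_spec high.reverse s (List.replicate k 1) low.length s.length
    (0 + pairRec low) (le_refl _)
    (by rw [hs]; simp)
    (by rw [List.take_length, hs, List.reverse_reverse, List.drop_left])
    hmid1 hhr1
  rw [hA]
  simp only [solution_alt]
  rw [← hsdef, hLow]
  simp only [zero_add] at hHigh ⊢
  rw [hHigh]
  simp only [List.length_replicate]
  ring_nf
  simp
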